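-- pv_equiv track=rewrite | github.com/Juyear009/Problem-Solving-Log | 프로그래머스/4/17685. ［3차］ 자동완성/［3차］ 자동완성.py | solution
-- ===== SOURCE A (Python) =====
-- class Node():
--     def __init__(self):
--         self.child = {}
--         self.count = 0
--
-- def solution(words):
--     answer = 0
--     root = Node()
--     for word in words:
--         node = root
--         for ch in word:
--             if ch not in node.child:
--                 node.child[ch] = Node()
--             node = node.child[ch]
--             node.count += 1
--
--     for word in words:
--         node = root
--         for ch in word:
--             node = node.child[ch]
--             answer += 1
--             if node.count == 1:
--                 break
--
--     return answer
-- ===== SOURCE B (Python) =====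
-- def lcp(a, b):
--     k = 0
--     for x, y in zip(a, b):
--         if x != y:
--             break
--         k += 1
--     return k
--
-- def solution(words):
--     total = 0
--     for i, w in enumerate(words):
--         m = 0
--         for j, v in enumerate(words):
--             if i != j:
--                 m = max(m, lcp(w, v))
--         total += min(len(w), m + 1)
--     return total
-- ===== Notes on version B (the rewrite author's own statement) =====
-- stated objective: simpler
-- what changed: Replaces the trie build plus per-word count-walk with a direct pairwise scan: each word contributes min(len(word), 1 + max longest-common-prefix with any other word).
import Mathlib
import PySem

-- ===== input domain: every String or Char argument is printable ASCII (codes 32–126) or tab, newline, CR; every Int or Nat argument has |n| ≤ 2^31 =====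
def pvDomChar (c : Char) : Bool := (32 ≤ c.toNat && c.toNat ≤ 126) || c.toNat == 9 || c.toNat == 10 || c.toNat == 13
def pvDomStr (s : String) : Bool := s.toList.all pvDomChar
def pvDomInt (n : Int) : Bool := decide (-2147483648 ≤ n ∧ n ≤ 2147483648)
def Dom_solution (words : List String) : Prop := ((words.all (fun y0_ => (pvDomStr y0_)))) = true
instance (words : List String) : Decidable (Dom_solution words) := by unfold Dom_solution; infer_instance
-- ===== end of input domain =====

-- B replaces A's trie (build + per-word count walk) by a direct pairwise scan:
-- each word contributes min(len(word), 1 + max LCP with any other word). Same return value; no speed claim.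

-- ===== PORT A =====
-- A's trie: Node { child : dict, count : int }. A mutual pair encodes the node / child-dict
-- (dict Char Node in insertion order, first-match lookup, overwrite in place, append new at end).
mutual
inductive PNode where
  | mk : Int → PKids → PNode
inductive PKids where
  | nil : PKids
  | cons : Char → PNode → PKids → PKids
end

def PNode.count : PNode → Int
  | .mk k _ => k

def PNode.kids : PNode → PKids
  | .mk _ ks => ks

-- dict lookup: first match (Python dict keys are unique; first match = the match)
def kidsFind : PKids → Char → Option PNode
  | .nil, _ => none
  | .cons d n rest, c => if d = c then some n else kidsFind rest c

-- 'if ch not in node.child: node.child[ch] = Node()' followed by an in-place update of child[ch]: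
-- modify the entry in place, appending a fresh empty node at the end if the key is absent.
def kidsModify : PKids → Char → (PNode → PNode) → PKids
  | .nil, c, f => .cons c (f (PNode.mk 0 .nil)) .nil
  | .cons d n rest, c, f => if d = c then .cons d (f n) rest else .cons d n (kidsModify rest c f)

-- 'node.count += 1'
def bump : PNode → PNode
  | .mk k ks => .mk (k + 1) ks

-- first loop body: walk down the chars of one word, creating nodes and doing 'node.count += 1'
def insertW : (cs : List Char) → PNode → PNode
  | [], t => t
  | c :: cs, t => PNode.mk t.count (kidsModify t.kids c (fun ch => insertW cs (bump ch)))
  termination_by cs _ => cs.length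
  decreasing_by simp

-- second loop body: 'node = node.child[ch]; answer += 1; if node.count == 1: break'
-- (a missing child would be a Python KeyError; it is unreachable because every word was inserted)
def typed : List Char → PNode → Int
  | [], _ => 0
  | c :: cs, t =>
      match kidsFind t.kids c with
      | none => 0
      | some m => 1 + (if m.count = 1 then 0 else typed cs m)

def solution (words : List String) : Int :=
  let root := words.foldl (fun t w => insertW w.toList t) (PNode.mk 0 .nil)
  words.foldl (fun answer w => answer + typed w.toList root) 0

-- ===== PORT B =====
-- lcp(a, b): common-prefix length, the structural recursion for Source B's zip loop with break
def lcpN : List Char → List Char → Nat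
  | a :: as_, b :: bs => if a = b then lcpN as_ bs + 1 else 0
  | _, _ => 0

def solution_alt (words : List String) : Int :=
  (PySem.List.enumerate words).foldl (fun total iw =>
    let m : Int := (PySem.List.enumerate words).foldl (fun m jv =>
      if iw.1 ≠ jv.1 then max m ((lcpN iw.2.toList jv.2.toList : Nat) : Int) else m) 0
    total + min ((iw.2.toList.length : Nat) : Int) (m + 1)) 0

-- ===== PRECONDITION & SPEC =====
def Spec_solution (words : List String) (out : Int) : Prop := out = solution_alt words
instance (words : List String) (out : Int) : Decidable (Spec_solution words out) := by unfold Spec_solution; infer_instance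

-- ===== CLAIM (what is proved, stated in full; the proofs are below) =====
def Claim_equal_solution : Prop := ∀ (words : List String), Dom_solution words → Spec_solution words (solution words)

-- ===== LEMMAS AND PROOFS =====

-- number of words having p as a prefix
def C (ws : List String) (p : List Char) : Nat :=
  ws.countP (fun w => decide (p <+: w.toList))

-- count stored at the node reached along path p (0 if the path is absent)
def cntP : List Char → PNode → Int
  | [], t => t.count
  | c :: cs, t =>
      match kidsFind t.kids c with
      | none => 0
      | some m => cntP cs m

-- inner fold of solution_alt, named
def innerM (ws : List String) (ii : Int) (w : String) : Int :=
  (PySem.List.enumerate ws).foldl (fun m jv =>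
    if ii ≠ jv.1 then max m ((lcpN w.toList jv.2.toList : Nat) : Int) else m) 0

-- spec of the second-loop walk, phrased on prefix counts only
def wSpec (ws : List String) : List Char → List Char → Int
  | [], _ => 0
  | c :: cs, u => 1 + (if C ws (u ++ [c]) = 1 then 0 else wSpec ws cs (u ++ [c]))

theorem kidsFind_kidsModify : (ks : PKids) → (c d : Char) → (f : PNode → PNode) →
    kidsFind (kidsModify ks d f) c =
      (if c = d then some (f ((kidsFind ks d).getD (PNode.mk 0 .nil))) else kidsFind ks c)
  | .nil, c, d, f => by
      by_cases h : c = d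
      · subst h; simp [kidsModify, kidsFind]
      · simp [kidsModify, kidsFind, h, Ne.symm h]
  | .cons e n rest, c, d, f => by
      by_cases hed : e = d
      · subst hed
        by_cases hce : c = e
        · subst hce; simp [kidsModify, kidsFind]
        · simp [kidsModify, kidsFind, hce, Ne.symm hce]
      · by_cases hce : e = c
        · subst hce
          simp [kidsModify, kidsFind, hed]
        · by_cases hcd : c = d
          · subst hcd
            simp [kidsModify, kidsFind, hed, kidsFind_kidsModify rest c c f]
          · simp [kidsModify, kidsFind, hed, hce, hcd, kidsFind_kidsModify rest c d f]

theorem count_insertW (w : List Char) (t : PNode) : (insertW w t).count = t.count := by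
  cases w <;> simp [insertW, PNode.count]

theorem cntP_count_irrel (p : List Char) (hp : p ≠ []) (a b : Int) (ks : PKids) :
    cntP p (PNode.mk a ks) = cntP p (PNode.mk b ks) := by
  cases p with
  | nil => exact absurd rfl hp
  | cons c cs => simp [cntP, PNode.kids]

theorem cntP_nilKids (p : List Char) (hp : p ≠ []) (a : Int) : cntP p (PNode.mk a .nil) = 0 := by
  cases p with
  | nil => exact absurd rfl hp
  | cons c cs => simp [cntP, PNode.kids, kidsFind]

theorem count_bump (n : PNode) : (bump n).count = n.count + 1 := by
  cases n; rfl

theorem cntP_bump (p : List Char) (hp : p ≠ []) (n : PNode) : cntP p (bump n) = cntP p n := by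
  cases n with
  | mk k ks => exact cntP_count_irrel p hp _ _ _

def cntK (o : Option PNode) (ps : List Char) : Int :=
  match o with
  | none => 0
  | some m => cntP ps m

theorem cntK_none (ps : List Char) : cntK none ps = 0 := rfl
theorem cntK_some (m : PNode) (ps : List Char) : cntK (some m) ps = cntP ps m := rfl

def typK (o : Option PNode) (cs : List Char) : Int :=
  match o with
  | none => 0
  | some m => 1 + (if m.count = 1 then 0 else typed cs m)

theorem typK_some (m : PNode) (cs : List Char) :
    typK (some m) cs = 1 + (if m.count = 1 then 0 else typed cs m) := rfl

theorem cntP_insertW (p : List Char) (hp : p ≠ []) (w : List Char) (t : PNode) :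
    cntP p (insertW w t) = cntP p t + (if p <+: w then 1 else 0) := by
  induction p generalizing w t with
  | nil => exact absurd rfl hp
  | cons c ps ih =>
      cases w with
      | nil => simp [insertW]
      | cons d ds =>
          cases t with
          | mk k ks =>
            rw [insertW]
            have hstep : ∀ g : PNode → PNode,
                cntP (c :: ps) (PNode.mk (PNode.mk k ks).count (kidsModify ks d g))
                  = cntK (kidsFind (kidsModify ks d g) c) ps := fun g => rfl
            have hbase : cntP (c :: ps) (PNode.mk k ks)
                = cntK (kidsFind ks c) ps := rfl
            rw [show (PNode.mk k ks).kids = ks from rfl, hstep, hbase,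
              kidsFind_kidsModify ks c d (fun ch => insertW ds (bump ch))]
            by_cases hcd : c = d
            · subst hcd
              rw [if_pos rfl, cntK_some]
              set ch0 := (kidsFind ks c).getD (PNode.mk 0 PKids.nil) with hch0
              have hgetD : cntK (kidsFind ks c) ps =
                  (if ps = [] then ch0.count else cntP ps ch0) := by
                cases hks : kidsFind ks c with
                | none =>
                    by_cases hps : ps = []
                    · subst hps; simp [hch0, hks, cntK_none, PNode.count]
                    · simp [hch0, hks, hps, cntK_none, cntP_nilKids ps hps]
                | some m =>
                    by_cases hps : ps = [] <;> simp [hch0, hks, hps, cntK_some, cntP]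
              rw [hgetD]
              by_cases hps : ps = []
              · subst hps
                rw [show cntP [] (insertW ds (bump ch0)) = (insertW ds (bump ch0)).count
                    from rfl, count_insertW, count_bump, if_pos rfl]
                simp [List.cons_prefix_cons]
              · rw [ih hps, cntP_bump ps hps, if_neg hps]
                simp [List.cons_prefix_cons]
            · rw [if_neg hcd]
              simp [List.cons_prefix_cons, hcd]
theorem cntP_build (ws : List String) (p : List Char) (hp : p ≠ []) :
    cntP p (ws.foldl (fun t w => insertW w.toList t) (PNode.mk 0 .nil)) = (C ws p : Int) := by
  have gen : ∀ (l : List String) (t : PNode),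
      cntP p (l.foldl (fun t w => insertW w.toList t) t) = cntP p t + (C l p : Int) := by
    intro l
    induction l with
    | nil => intro t; simp [C]
    | cons w tl ih =>
        intro t
        rw [List.foldl_cons, ih, cntP_insertW p hp]
        unfold C
        rw [List.countP_cons]
        by_cases hw : p <+: w.toList <;> simp [hw]; ring
  rw [gen ws _, cntP_nilKids p hp]
  simp

theorem C_anti (ws : List String) (p q : List Char) (h : p <+: q) : C ws q ≤ C ws p := by
  unfold C
  refine List.countP_mono_left ?_
  intro w _ hw
  simp only [decide_eq_true_eq] at *
  exact h.trans hw

theorem typed_eq_wSpec (ws : List String) (cs u : List Char) (t : PNode)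
    (hcnt : ∀ q, q ≠ [] → cntP q t = (C ws (u ++ q) : Int))
    (hpos : 1 ≤ C ws (u ++ cs)) :
    typed cs t = wSpec ws cs u := by
  induction cs generalizing u t with
  | nil => simp [typed, wSpec]
  | cons c cs ih =>
      have hpre : (u ++ [c]) <+: (u ++ (c :: cs)) := ⟨cs, by simp⟩
      have hp1 : 1 ≤ C ws (u ++ [c]) := le_trans hpos (C_anti ws _ _ hpre)
      have hc : cntP [c] t = (C ws (u ++ [c]) : Int) := hcnt [c] (by simp)
      cases hfind : kidsFind t.kids c with
      | none =>
          exfalso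
          rw [show cntP [c] t = cntK (kidsFind t.kids c) [] from rfl, hfind, cntK_none] at hc
          omega
      | some m =>
          have hmc : m.count = (C ws (u ++ [c]) : Int) := by
            rw [← hc, show cntP [c] t = cntK (kidsFind t.kids c) [] from rfl, hfind,
              cntK_some]
            rfl
          rw [show typed (c :: cs) t = typK (kidsFind t.kids c) cs from rfl, hfind,
            typK_some]
          rw [show wSpec ws (c :: cs) u
              = 1 + (if C ws (u ++ [c]) = 1 then 0 else wSpec ws cs (u ++ [c])) from rfl]
          by_cases h1 : C ws (u ++ [c]) = 1
          · have hm1 : m.count = 1 := by rw [hmc, h1]; rfl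
            rw [if_pos hm1, if_pos h1]
          · have hm1 : ¬ (m.count = 1) := by
              rw [hmc]
              intro hcontra
              exact h1 (by exact_mod_cast hcontra)
            rw [if_neg hm1, if_neg h1]
            congr 1
            apply ih (u ++ [c]) m
            · intro q hq
              have hq2 := hcnt (c :: q) (by simp)
              rw [show cntP (c :: q) t = cntK (kidsFind t.kids c) q from rfl, hfind,
                cntK_some] at hq2
              rw [hq2]
              congr 1
              simp
            · have : u ++ [c] ++ cs = u ++ (c :: cs) := by simp
              rw [this]
              exact hpos

theorem le_lcpN_of_prefix (a b : List Char) (k : Nat) (hk : k ≤ a.length)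
    (h : a.take k <+: b) : k ≤ lcpN a b := by
  induction a generalizing b k with
  | nil =>
      simp only [List.length_nil, Nat.le_zero] at hk
      subst hk
      exact Nat.zero_le _
  | cons x xs ih =>
      cases k with
      | zero => omega
      | succ k' =>
          cases b with
          | nil => simp [List.take_succ_cons] at h
          | cons y ys =>
              simp only [List.take_succ_cons, List.cons_prefix_cons] at h
              obtain ⟨rfl, h2⟩ := h
              simp only [List.length_cons] at hk
              have := ih ys k' (by omega) h2
              simp [lcpN]
              omega

theorem prefix_of_le_lcpN (a b : List Char) (k : Nat) (h : k ≤ lcpN a b) :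
    a.take k <+: b := by
  induction a generalizing b k with
  | nil => simp [lcpN] at h; simp [h]
  | cons x xs ih =>
      cases k with
      | zero => simp
      | succ k' =>
          cases b with
          | nil => simp [lcpN] at h
          | cons y ys =>
              by_cases hxy : x = y
              · subst hxy
                rw [show lcpN (x :: xs) (x :: ys) = lcpN xs ys + 1 from by simp [lcpN]] at h
                rw [List.take_succ_cons]
                exact List.cons_prefix_cons.mpr ⟨rfl, ih ys k' (by omega)⟩
              · simp [lcpN, hxy] at h

theorem countP_eq_one_of (l : List String) (pd : String → Bool) (i : Nat) (hi : i < l.length)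
    (hp : pd l[i] = true) (hno : ∀ j, (hj : j < l.length) → j ≠ i → pd l[j] = false) :
    l.countP pd = 1 := by
  induction l generalizing i with
  | nil => simp at hi
  | cons w tl ih =>
      cases i with
      | zero =>
          simp only [List.getElem_cons_zero] at hp
          have h0 : tl.countP pd = 0 := by
            rw [List.countP_eq_zero]
            intro x hx
            obtain ⟨j, hj, rfl⟩ := List.getElem_of_mem hx
            have := hno (j + 1) (by simpa using Nat.succ_lt_succ hj) (by omega)
            simpa using this
          simp [hp, h0]
      | succ i' =>
          have h0 : pd w = false := by
            have := hno 0 (by simp) (by omega)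
            simpa using this
          have := ih i' (by simpa using Nat.lt_of_succ_lt_succ hi)
            (by simpa using hp)
            (fun j hj hne => by
              have := hno (j + 1) (by simpa using Nat.succ_lt_succ hj) (by omega)
              simpa using this)
          simp [h0, this]

theorem two_le_countP (l : List String) (pd : String → Bool) (i j : Nat)
    (hi : i < l.length) (hj : j < l.length) (hij : i ≠ j)
    (hpi : pd l[i] = true) (hpj : pd l[j] = true) : 2 ≤ l.countP pd := by
  induction l generalizing i j with
  | nil => simp at hi
  | cons w tl ih =>
      cases i with
      | zero =>
          cases j with
          | zero => omega
          | succ j' =>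
              simp only [List.getElem_cons_zero] at hpi
              simp only [List.getElem_cons_succ] at hpj
              have h1 : 1 ≤ tl.countP pd := by
                rw [Nat.one_le_iff_ne_zero]
                intro h0
                rw [List.countP_eq_zero] at h0
                exact absurd hpj (by simp [h0 _ (List.getElem_mem _)])
              rw [List.countP_cons]
              simp only [hpi, if_true]
              exact Nat.succ_le_succ h1
      | succ i' =>
          cases j with
          | zero =>
              simp only [List.getElem_cons_zero] at hpj
              simp only [List.getElem_cons_succ] at hpi
              have h1 : 1 ≤ tl.countP pd := by
                rw [Nat.one_le_iff_ne_zero]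
                intro h0
                rw [List.countP_eq_zero] at h0
                exact absurd hpi (by simp [h0 _ (List.getElem_mem _)])
              rw [List.countP_cons]
              simp only [hpj, if_true]
              exact Nat.succ_le_succ h1
          | succ j' =>
              have := ih i' j' (by simpa using Nat.lt_of_succ_lt_succ hi)
                (by simpa using Nat.lt_of_succ_lt_succ hj) (by omega)
                (by simpa using hpi) (by simpa using hpj)
              calc 2 ≤ tl.countP pd := this
                _ ≤ (w :: tl).countP pd := by
                      rw [List.countP_cons]
                      exact Nat.le_add_right _ _ |>.trans' le_rfl |>.trans (le_refl _) |>.trans (le_refl _)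

theorem foldM_ge_init (cw : List Char) (ii : Int) (l : List (Int × String)) (a : Int) :
    a ≤ l.foldl (fun m jv => if ii ≠ jv.1 then max m ((lcpN cw jv.2.toList : Nat) : Int) else m) a := by
  induction l generalizing a with
  | nil => simp
  | cons y l ih =>
      refine le_trans ?_ (ih _)
      by_cases h : ii ≠ y.1 <;> simp [h]

theorem foldM_ge_elem (cw : List Char) (ii : Int) (l : List (Int × String)) (a : Int)
    (x : Int × String) (hx : x ∈ l) (hne : ii ≠ x.1) :
    ((lcpN cw x.2.toList : Nat) : Int) ≤
      l.foldl (fun m jv => if ii ≠ jv.1 then max m ((lcpN cw jv.2.toList : Nat) : Int) else m) a := by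
  induction l generalizing a with
  | nil => simp at hx
  | cons y l ih =>
      rcases List.mem_cons.mp hx with rfl | hmem
      · refine le_trans ?_ (foldM_ge_init cw ii l _)
        simp [hne]
      · exact ih _ hmem

theorem foldM_cases (cw : List Char) (ii : Int) (l : List (Int × String)) (a : Int) :
    l.foldl (fun m jv => if ii ≠ jv.1 then max m ((lcpN cw jv.2.toList : Nat) : Int) else m) a = a ∨
    ∃ x ∈ l, ii ≠ x.1 ∧
      l.foldl (fun m jv => if ii ≠ jv.1 then max m ((lcpN cw jv.2.toList : Nat) : Int) else m) a
        = ((lcpN cw x.2.toList : Nat) : Int) := by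
  induction l generalizing a with
  | nil => left; rfl
  | cons y l ih =>
      rw [List.foldl_cons]
      rcases ih (if ii ≠ y.1 then max a ((lcpN cw y.2.toList : Nat) : Int) else a) with h | ⟨x, hx, hnex, hval⟩
      · rw [h]
        by_cases hy : ii ≠ y.1
        · rw [if_pos hy]
          rcases max_choice a ((lcpN cw y.2.toList : Nat) : Int) with hm | hm
          · left; rw [hm]
          · right; exact ⟨y, List.mem_cons_self, hy, hm⟩
        · left; rw [if_neg hy]
      · right; exact ⟨x, List.mem_cons_of_mem _ hx, hnex, hval⟩

theorem innerM_nonneg (ws : List String) (ii : Int) (w : String) : 0 ≤ innerM ws ii w := by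
  exact foldM_ge_init _ _ _ _

theorem C_take_eq_one_iff (ws : List String) (i : Nat) (hi : i < ws.length) (k : Nat)
    (hk1 : 1 ≤ k) (hk2 : k ≤ ws[i].toList.length) :
    (C ws (ws[i].toList.take k) = 1) ↔ innerM ws (i : Int) ws[i] < (k : Int) := by
  constructor
  · intro h1
    by_contra hM
    rw [not_lt] at hM
    have hMk : (k : Int) ≤ innerM ws (i : Int) ws[i] := hM
    have hkpos : (0 : Int) < innerM ws (i : Int) ws[i] := by
      have : (1 : Int) ≤ (k : Int) := by exact_mod_cast hk1
      omega
    rcases foldM_cases ws[i].toList (i : Int) (PySem.List.enumerate ws) 0 with h0 | ⟨x, hx, hne, hval⟩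
    · rw [show innerM ws (i : Int) ws[i] = (PySem.List.enumerate ws).foldl
          (fun m jv => if (i : Int) ≠ jv.1 then max m
            ((lcpN ws[i].toList jv.2.toList : Nat) : Int) else m) 0 from rfl, h0] at hkpos
      omega
    · obtain ⟨j, hj, rfl⟩ := (PySem.List.mem_enumerate_iff _ _ _).mp hx
      have hij : i ≠ j := by
        intro hcontra
        subst hcontra
        simp at hne
      have hlcp : (k : Int) ≤ ((lcpN ws[i].toList ws[j].toList : Nat) : Int) := by
        rw [show innerM ws (i : Int) ws[i] = (PySem.List.enumerate ws).foldl
            (fun m jv => if (i : Int) ≠ jv.1 then max m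
              ((lcpN ws[i].toList jv.2.toList : Nat) : Int) else m) 0 from rfl, hval] at hMk
        exact hMk
      have hlcpN : k ≤ lcpN ws[i].toList ws[j].toList := by exact_mod_cast hlcp
      have hpj : ws[i].toList.take k <+: ws[j].toList :=
        prefix_of_le_lcpN _ _ _ hlcpN
      have h2 : 2 ≤ ws.countP (fun w => decide (ws[i].toList.take k <+: w.toList)) :=
        two_le_countP ws _ i j hi hj hij
          (by simp [List.take_prefix]) (by simp [hpj])
      rw [show C ws (ws[i].toList.take k)
          = ws.countP (fun w => decide (ws[i].toList.take k <+: w.toList)) from rfl] at h1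
      omega
  · intro hM
    rw [show C ws (ws[i].toList.take k)
        = ws.countP (fun w => decide (ws[i].toList.take k <+: w.toList)) from rfl]
    apply countP_eq_one_of ws _ i hi (by simp [List.take_prefix])
    intro j hj hji
    by_contra hpj
    simp only [Bool.not_eq_false, decide_eq_true_eq] at hpj
    have hlcpN : k ≤ lcpN ws[i].toList ws[j].toList :=
      le_lcpN_of_prefix _ _ _ hk2 hpj
    have hmem : ((j : Int), ws[j]) ∈ PySem.List.enumerate ws := by
      rw [PySem.List.mem_enumerate_iff _ _ _]
      exact ⟨j, hj, by simp⟩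
    have hne : (i : Int) ≠ (j : Int) := by
      intro hcontra
      exact hji (by exact_mod_cast hcontra.symm)
    have := foldM_ge_elem ws[i].toList (i : Int) (PySem.List.enumerate ws) 0
      ((j : Int), ws[j]) hmem hne
    rw [show (PySem.List.enumerate ws).foldl
        (fun m jv => if (i : Int) ≠ jv.1 then max m
          ((lcpN ws[i].toList jv.2.toList : Nat) : Int) else m) 0
        = innerM ws (i : Int) ws[i] from rfl] at this
    have hki : (k : Int) ≤ ((lcpN ws[i].toList ws[j].toList : Nat) : Int) := by
      exact_mod_cast hlcpN
    exact absurd hM (not_lt.mpr (le_trans hki this))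

theorem wSpec_eq (ws : List String) (i : Nat) (hi : i < ws.length) :
    ∀ (cs u : List Char), u ++ cs = ws[i].toList →
    (∀ k, 1 ≤ k → k ≤ u.length → C ws (ws[i].toList.take k) ≠ 1) →
    wSpec ws cs u =
      min ((ws[i].toList.length : Nat) : Int) (innerM ws (i : Int) ws[i] + 1) - u.length := by
  intro cs
  induction cs with
  | nil =>
      intro u hu hks
      have hu' : u = ws[i].toList := by simpa using hu
      have hM : ((ws[i].toList.length : Nat) : Int) ≤ innerM ws (i : Int) ws[i] + 1 := by
        by_cases h0 : ws[i].toList.length = 0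
        · have := innerM_nonneg ws (i : Int) ws[i]
          omega
        · have hk := hks ws[i].toList.length (by omega) (by simp [hu'])
          have hiff := C_take_eq_one_iff ws i hi ws[i].toList.length (by omega) le_rfl
          have hnotlt : ¬ (innerM ws (i : Int) ws[i] < ((ws[i].toList.length : Nat) : Int)) :=
            fun hc => hk (hiff.mpr hc)
          omega
      rw [show wSpec ws [] u = 0 from rfl, min_eq_left hM, hu']
      omega
  | cons c cs ih =>
      intro u hu hks
      have hlen : u.length + 1 + cs.length = ws[i].toList.length := by
        rw [← hu]; simp; omega
      have htake : ws[i].toList.take (u.length + 1) = u ++ [c] := by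
        rw [← hu, show u ++ c :: cs = (u ++ [c]) ++ cs by simp,
          List.take_left' (by simp)]
      rw [show wSpec ws (c :: cs) u
          = 1 + (if C ws (u ++ [c]) = 1 then 0 else wSpec ws cs (u ++ [c])) from rfl]
      have hiff := C_take_eq_one_iff ws i hi (u.length + 1) (by omega) (by omega)
      rw [htake] at hiff
      by_cases h1 : C ws (u ++ [c]) = 1
      · rw [if_pos h1]
        have hlt : innerM ws (i : Int) ws[i] < ((u.length + 1 : Nat) : Int) := hiff.mp h1
        have hge : ((u.length : Nat) : Int) ≤ innerM ws (i : Int) ws[i] := by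
          by_cases h0 : u.length = 0
          · have := innerM_nonneg ws (i : Int) ws[i]
            omega
          · have hk := hks u.length (by omega) le_rfl
            have := (C_take_eq_one_iff ws i hi u.length (by omega) (by omega))
            have hnotlt : ¬ (innerM ws (i : Int) ws[i] < (u.length : Int)) := fun hc =>
              hk (this.mpr hc)
            omega
        have hmin : min ((ws[i].toList.length : Nat) : Int) (innerM ws (i : Int) ws[i] + 1)
            = innerM ws (i : Int) ws[i] + 1 := min_eq_right (by push_cast at *; omega)
        rw [hmin]
        push_cast at *
        omega
      · rw [if_neg h1]
        have hnotlt : ¬ (innerM ws (i : Int) ws[i] < ((u.length + 1 : Nat) : Int)) :=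
          fun hc => h1 (hiff.mpr hc)
        have hrec := ih (u ++ [c])
          (by rw [show (u ++ [c]) ++ cs = u ++ c :: cs by simp]; exact hu)
          (by
            intro k hk1 hk2
            simp only [List.length_append, List.length_cons, List.length_nil] at hk2
            by_cases hkm : k ≤ u.length
            · exact hks k hk1 hkm
            · have hkeq : k = u.length + 1 := by omega
              subst hkeq
              rw [htake]
              exact h1)
        rw [hrec]
        simp only [List.length_append, List.length_cons, List.length_nil]
        push_cast at *
        omega

theorem perWord (ws : List String) (i : Nat) (hi : i < ws.length) :
    typed ws[i].toList (ws.foldl (fun t w => insertW w.toList t) (PNode.mk 0 .nil)) =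
      min ((ws[i].toList.length : Nat) : Int) (innerM ws (i : Int) ws[i] + 1) := by
  have h1 := typed_eq_wSpec ws ws[i].toList []
    (ws.foldl (fun t w => insertW w.toList t) (PNode.mk 0 .nil))
    (by
      intro q hq
      rw [List.nil_append]
      exact cntP_build ws q hq)
    (by
      rw [List.nil_append]
      have : 0 < C ws ws[i].toList := by
        unfold C
        rw [List.countP_pos_iff]
        exact ⟨ws[i], List.getElem_mem hi, by simp⟩
      omega)
  have h2 := wSpec_eq ws i hi ws[i].toList [] (by simp)
    (by intro k hk1 hk2; simp at hk2; omega)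
  rw [h1, h2]
  simp

theorem foldl_add_eq {α : Type} (g : α → Int) (l : List α) (a : Int) :
    l.foldl (fun s x => s + g x) a = a + (l.map g).sum := by
  induction l generalizing a with
  | nil => simp
  | cons x l ih => simp [ih]; ring

-- ===== VERDICT (by name: the statement is the Claim_ definition above) =====
theorem solution_spec : Claim_equal_solution := by
  intro ws _
  show solution ws = solution_alt ws
  have hA : solution ws = 0 + (ws.map (fun w => typed w.toList
      (ws.foldl (fun t w => insertW w.toList t) (PNode.mk 0 .nil)))).sum :=
    foldl_add_eq _ ws 0
  have hB : solution_alt ws = 0 + ((PySem.List.enumerate ws).map (fun iw =>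
      min ((iw.2.toList.length : Nat) : Int) (innerM ws iw.1 iw.2 + 1))).sum :=
    foldl_add_eq _ _ 0
  rw [hA, hB]
  refine congrArg (fun l => 0 + List.sum l) (List.ext_getElem ?_ ?_)
  · simp [PySem.List.length_enumerate]
  · intro n h1 h2
    simp only [List.getElem_map]
    rw [PySem.List.getElem_enumerate]
    have hn : n < ws.length := by simpa using h1
    show typed ws[n].toList _ = min ((ws[n].toList.length : Nat) : Int)
      (innerM ws (0 + (n : Int)) ws[n] + 1)
    rw [show (0 : Int) + (n : Int) = (n : Int) by ring]
    exact perWord ws n hn
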